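-- pv_equiv track=rewrite | github.com/Pato546/structural_analysis | src/structural_analysis/bending_shear.py | _convert_points
-- ===== SOURCE A (Python) =====
-- def _convert_points(points: list):
--
--     n = []
--
--     for idx, vals in enumerate(points):
--         l, u = vals
--
--         if idx == 0:
--             n.append(vals)
--             continue
--
--         n.append((n[idx - 1][1] + l, n[idx - 1][1] + u))
--
--     return n
-- ===== SOURCE B (Python) =====
-- def _convert_points(points: list):
--     # two-pass: build the running-offset table first, then shape the output
--     offsets = []
--     total = 0
--     for _, u in points:
--         offsets.append(total)
--         total += u
--     return [vals if idx == 0 else (off + vals[0], off + vals[1])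
--             for idx, (off, vals) in enumerate(zip(offsets, points))]
-- ===== Notes on version B (the rewrite author's own statement) =====
-- stated objective: alternative
-- what changed: B precomputes a running-offset table in one pass and then builds the output by a single shaped comprehension over zip(offsets, points), instead of A's loop that re-reads the previously appended pair n[idx-1][1] from the output list at every step.
import Mathlib
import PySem

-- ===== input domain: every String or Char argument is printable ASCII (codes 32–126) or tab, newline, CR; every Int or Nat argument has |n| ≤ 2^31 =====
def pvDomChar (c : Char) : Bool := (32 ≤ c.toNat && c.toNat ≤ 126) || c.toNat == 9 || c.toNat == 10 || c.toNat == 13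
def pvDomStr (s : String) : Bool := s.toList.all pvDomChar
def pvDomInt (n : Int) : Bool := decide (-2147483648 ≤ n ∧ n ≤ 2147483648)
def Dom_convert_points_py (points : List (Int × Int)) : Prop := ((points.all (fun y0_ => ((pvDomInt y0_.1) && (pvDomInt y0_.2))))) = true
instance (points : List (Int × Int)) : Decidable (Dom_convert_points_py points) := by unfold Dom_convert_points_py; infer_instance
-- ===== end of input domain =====

-- B replaces A's read-back of the previously appended output pair by a precomputed
-- running-offset table and a single shaped pass; same values, same cost (alternative decomposition).

-- ===== PORT A =====
-- the loop body of A, recursing over the enumerated list with the output list n as state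
def convertPointsGoA : List (Int × (Int × Int)) → List (Int × Int) → List (Int × Int)
  | [], n => n
  | (idx, (l, u)) :: rest, n =>
    if idx == 0 then
      convertPointsGoA rest (n ++ [(l, u)])
    else
      match PySem.List.pyGet? n (idx - 1) with
      | some p => convertPointsGoA rest (n ++ [(p.2 + l, p.2 + u)])
      | none => n  -- IndexError in Python; unreachable: idx-1 always indexes the last appended pair

def convert_points_py (points : List (Int × Int)) : List (Int × Int) :=
  convertPointsGoA (PySem.List.enumerate points) []

-- ===== PORT B =====
-- first pass of Source B: the running-offset table (offsets.append(total); total += u)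
def convertPointsOffsets : List (Int × Int) → Int → List Int
  | [], _ => []
  | (_, u) :: rest, total => total :: convertPointsOffsets rest (total + u)

def convert_points_py_alt (points : List (Int × Int)) : List (Int × Int) :=
  (PySem.List.enumerate ((convertPointsOffsets points 0).zip points)).map
    (fun
      | (idx, (off, vals)) => if idx == 0 then vals else (off + vals.1, off + vals.2))

-- ===== PRECONDITION & SPEC =====
def Spec_convert_points_py (points : List (Int × Int)) (out : List (Int × Int)) : Prop := out = convert_points_py_alt points
instance (points : List (Int × Int)) (out : List (Int × Int)) : Decidable (Spec_convert_points_py points out) := by unfold Spec_convert_points_py; infer_instance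

-- ===== CLAIM (what is proved, stated in full; the proofs are below) =====
def Claim_equal_convert_points_py : Prop := ∀ (points : List (Int × Int)), Dom_convert_points_py points → Spec_convert_points_py points (convert_points_py points)

-- ===== LEMMAS AND PROOFS =====

-- common reference: the converted tail, given the running upper accumulator
def convertPointsG : Int → List (Int × Int) → List (Int × Int)
  | _, [] => []
  | acc, (l, u) :: rest => (acc + l, acc + u) :: convertPointsG (acc + u) rest

theorem goA_eq_g (rest : List (Int × Int)) :
    ∀ (m : List (Int × Int)) (p : Int × Int),
      convertPointsGoA (PySem.List.enumerate rest ((m.length : Int) + 1)) (m ++ [p])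
        = (m ++ [p]) ++ convertPointsG p.2 rest := by
  induction rest with
  | nil => intro m p; simp [PySem.List.enumerate_nil, convertPointsGoA, convertPointsG]
  | cons v rest ih =>
    intro m p
    obtain ⟨l, u⟩ := v
    rw [PySem.List.enumerate_cons]
    have hidx : ((m.length : Int) + 1 == 0) = false := by
      simp
      omega
    have hget : PySem.List.pyGet? (m ++ [p]) ((m.length : Int) + 1 - 1) = some p := by
      have : (m.length : Int) + 1 - 1 = (m.length : Int) := by omega
      rw [this]
      exact PySem.List.pyGet?_append_length (pre := m) (y := p) (ys := [])
    simp only [convertPointsGoA, hidx, Bool.false_eq_true, if_false, hget]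
    have hlen : ((m.length : Int) + 1) + 1 = (((m ++ [p]).length : Int) + 1) := by
      simp
    rw [hlen]
    rw [ih (m ++ [p]) (p.2 + l, p.2 + u)]
    simp [convertPointsG, List.append_assoc]

theorem alt_tail_eq_g (rest : List (Int × Int)) :
    ∀ (total s : Int), 1 ≤ s →
      (PySem.List.enumerate ((convertPointsOffsets rest total).zip rest) s).map
        (fun
          | (idx, (off, vals)) => if idx == 0 then vals else (off + vals.1, off + vals.2))
        = convertPointsG total rest := by
  induction rest with
  | nil => intro total s _; simp [convertPointsOffsets, PySem.List.enumerate_nil, convertPointsG]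
  | cons v rest ih =>
    intro total s hs
    obtain ⟨l, u⟩ := v
    rw [show convertPointsOffsets ((l, u) :: rest) total = total :: convertPointsOffsets rest (total + u) from rfl]
    rw [List.zip_cons_cons, PySem.List.enumerate_cons, List.map_cons]
    have hidx : (s == 0) = false := by simp; omega
    rw [ih (total + u) (s + 1) (by omega)]
    simp [convertPointsG, hidx]

-- ===== VERDICT (by name: the statement is the Claim_ definition above) =====
theorem convert_points_py_spec : Claim_equal_convert_points_py := by
  intro points _
  unfold Spec_convert_points_py convert_points_py convert_points_py_alt
  cases points with
  | nil => simp [PySem.List.enumerate_nil, convertPointsGoA, convertPointsOffsets]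
  | cons v rest =>
    obtain ⟨l, u⟩ := v
    have hA := goA_eq_g rest [] (l, u)
    simp only [List.length_nil, Int.natCast_zero, List.nil_append, zero_add] at hA
    rw [PySem.List.enumerate_cons]
    rw [show (0 : Int) + 1 = 1 from rfl]
    rw [show convertPointsGoA ((0, (l, u)) :: PySem.List.enumerate rest 1) []
          = convertPointsGoA (PySem.List.enumerate rest 1) [(l, u)] from rfl]
    rw [hA]
    rw [show convertPointsOffsets ((l, u) :: rest) 0 = 0 :: convertPointsOffsets rest (0 + u) from rfl]
    rw [List.zip_cons_cons, PySem.List.enumerate_cons, List.map_cons]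
    rw [show (0 : Int) + 1 = 1 from rfl]
    rw [alt_tail_eq_g rest (0 + u) 1 (by omega)]
    simp
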